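-- pv_equiv track=rewrite | github.com/kdavila/ChartInfo_annotation_tools | ChartInfo/data/axis_values.py | IdentifyNumericPart
-- ===== SOURCE A (Python) =====
-- def IdentifyNumericPart(str_value):
--     num_start = 0
--     num_end = None
--     commas = []
--     dots = []
--     while num_start < len(str_value) and not (
--             "0" <= str_value[num_start] <= "9" or str_value[num_start] in [",", "."]):
--         num_start += 1
--
--     if num_start < len(str_value):
--         num_end = num_start
--         while num_end < len(str_value) and ("0" <= str_value[num_end] <= "9" or str_value[num_end] in [",", "."]):
--             if str_value[num_end] == ".":
--                 dots.append(num_end)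
--             if str_value[num_end] == ",":
--                 commas.append(num_end)
--
--             num_end += 1
--
--     return num_start, num_end, dots, commas
-- ===== SOURCE B (Python) =====
-- def IdentifyNumericPart(str_value):
--     def numeric(c):
--         return "0" <= c <= "9" or c in ",."
--     n = len(str_value)
--     num_start = next((i for i, c in enumerate(str_value) if numeric(c)), n)
--     if num_start == n:
--         return num_start, None, [], []
--     tail = str_value[num_start:]
--     run_len = next((i for i, c in enumerate(tail) if not numeric(c)), len(tail))
--     run = tail[:run_len]
--     dots = [num_start + i for i, c in enumerate(run) if c == "."]
--     commas = [num_start + i for i, c in enumerate(run) if c == ","]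
--     return num_start, num_start + run_len, dots, commas
-- ===== Notes on version B (the rewrite author's own statement) =====
-- stated objective: idiomatic
-- what changed: Replaces A's two stateful while-loops with inline appends by a find-first-index for the run start, a takewhile-style slice for the run, and two independent comprehension passes deriving the dot/comma positions from the matched run.
import Mathlib
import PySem

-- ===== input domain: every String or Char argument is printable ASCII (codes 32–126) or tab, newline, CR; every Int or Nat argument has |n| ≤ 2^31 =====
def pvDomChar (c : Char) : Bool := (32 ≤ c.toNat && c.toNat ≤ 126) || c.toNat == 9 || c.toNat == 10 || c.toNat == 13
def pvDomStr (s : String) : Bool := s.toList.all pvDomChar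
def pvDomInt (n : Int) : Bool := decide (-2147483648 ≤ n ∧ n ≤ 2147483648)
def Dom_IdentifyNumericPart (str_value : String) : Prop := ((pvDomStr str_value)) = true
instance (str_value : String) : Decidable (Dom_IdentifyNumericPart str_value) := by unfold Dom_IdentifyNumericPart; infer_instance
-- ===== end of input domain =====

-- B is an idiomatic re-decomposition (find-first-index + run slice + two comprehension passes)
-- of A's two stateful while-loops; same values everywhere, A is total.

-- ===== PORT A =====
-- the character test "0" <= c <= "9" or c in [",", "."] of A
def pvIsNum (c : Char) : Bool := ('0' ≤ c && c ≤ '9') || c = ',' || c = '.'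

-- A's first while loop: advance num_start over non-numeric chars
def pvAScan1 : List Char → Int → Int
  | [], ns => ns
  | c :: cs, ns => if pvIsNum c then ns else pvAScan1 cs (ns + 1)

-- A's second while loop: advance num_end over numeric chars, appending dot/comma indices
def pvAScan2 : List Char → Int → List Int → List Int → Int × List Int × List Int
  | [], ne, dots, commas => (ne, dots, commas)
  | c :: cs, ne, dots, commas =>
    if pvIsNum c then
      pvAScan2 cs (ne + 1) (if c = '.' then dots ++ [ne] else dots)
        (if c = ',' then commas ++ [ne] else commas)
    else (ne, dots, commas)

def IdentifyNumericPart (str_value : String) : Int × Option Int × List Int × List Int :=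
  let cs := str_value.toList
  let num_start := pvAScan1 cs 0
  if num_start < (cs.length : Int) then
    let r := pvAScan2 (cs.drop num_start.toNat) num_start [] []
    (num_start, some r.1, r.2.1, r.2.2)
  else
    (num_start, none, [], [])

-- ===== PORT B =====
-- B's helper numeric(c)
def pvBNumeric (c : Char) : Bool := ('0' ≤ c && c ≤ '9') || c = ',' || c = '.'

def IdentifyNumericPart_alt (str_value : String) : Int × Option Int × List Int × List Int :=
  let cs := str_value.toList
  let n : Int := cs.length
  -- num_start = next((i for i, c in enumerate(str_value) if numeric(c)), n)
  let num_start : Int := match cs.findIdx? pvBNumeric with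
    | some i => (i : Int)
    | none => n
  if num_start = n then (num_start, none, [], [])
  else
    let tail := cs.drop num_start.toNat             -- str_value[num_start:] (num_start ≥ 0 here)
    -- run_len = next((i for i, c in enumerate(tail) if not numeric(c)), len(tail))
    let run_len : Int := match tail.findIdx? (fun c => !pvBNumeric c) with
      | some i => (i : Int)
      | none => (tail.length : Int)
    let run := tail.take run_len.toNat              -- tail[:run_len] (run_len ≥ 0)
    let dots := (PySem.List.enumerate run 0).filterMap
      (fun p => if p.2 = '.' then some (num_start + p.1) else none)
    let commas := (PySem.List.enumerate run 0).filterMap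
      (fun p => if p.2 = ',' then some (num_start + p.1) else none)
    (num_start, num_start + run_len, dots, commas)

-- ===== PRECONDITION & SPEC =====
def Spec_IdentifyNumericPart (str_value : String) (out : Int × Option Int × List Int × List Int) : Prop := out = IdentifyNumericPart_alt str_value
instance (str_value : String) (out : Int × Option Int × List Int × List Int) : Decidable (Spec_IdentifyNumericPart str_value out) := by unfold Spec_IdentifyNumericPart; infer_instance

-- ===== CLAIM (what is proved, stated in full; the proofs are below) =====
def Claim_equal_IdentifyNumericPart : Prop := ∀ (str_value : String), Dom_IdentifyNumericPart str_value → Spec_IdentifyNumericPart str_value (IdentifyNumericPart str_value)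

-- ===== LEMMAS AND PROOFS =====

-- length of the numeric run at the head of cs (proof-only helper)
def pvRun (cs : List Char) : Nat :=
  match cs.findIdx? (fun c => !pvBNumeric c) with
  | some k => k
  | none => cs.length

theorem pvAScan1_eq (cs : List Char) (i : Int) :
    pvAScan1 cs i = i + (match cs.findIdx? pvBNumeric with
      | some k => (k : Int)
      | none => (cs.length : Int)) := by
  induction cs generalizing i with
  | nil => simp [pvAScan1]
  | cons c cs ih =>
    by_cases h : pvIsNum c = true
    · have hb : pvBNumeric c = true := h
      simp [pvAScan1, h, List.findIdx?_cons, hb]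
    · have hb : pvBNumeric c = false := by
        simpa [pvBNumeric, pvIsNum] using h
      simp only [pvAScan1, h, if_false, List.findIdx?_cons, hb, Bool.false_eq_true]
      rw [ih]
      cases hf : cs.findIdx? pvBNumeric with
      | none => simp; ring
      | some k => simp; ring

theorem pvEnum_shift (run : List Char) (ch : Char) (s t : Int) :
    (PySem.List.enumerate run (s + t)).filterMap
        (fun p => if p.2 = ch then some p.1 else none)
      = (PySem.List.enumerate run t).filterMap
        (fun p => if p.2 = ch then some (s + p.1) else none) := by
  induction run generalizing t with
  | nil => simp [PySem.List.enumerate_nil]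
  | cons c cs ih =>
    simp only [PySem.List.enumerate_cons, List.filterMap_cons]
    rw [show s + t + 1 = s + (t + 1) from by ring, ih (t + 1)]

theorem pvAScan2_eq (cs : List Char) (i : Int) (dots commas : List Int) :
    pvAScan2 cs i dots commas =
      ( i + (pvRun cs : Int),
        dots ++ (PySem.List.enumerate (cs.take (pvRun cs)) i).filterMap
          (fun p => if p.2 = '.' then some p.1 else none),
        commas ++ (PySem.List.enumerate (cs.take (pvRun cs)) i).filterMap
          (fun p => if p.2 = ',' then some p.1 else none)) := by
  induction cs generalizing i dots commas with
  | nil => simp [pvAScan2, pvRun]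
  | cons c cs ih =>
    by_cases h : pvIsNum c = true
    · have hb : (!pvBNumeric c) = false := by
        have hb' : pvBNumeric c = true := h
        simp [hb']
      have hrun : pvRun (c :: cs) = pvRun cs + 1 := by
        simp only [pvRun, List.findIdx?_cons, hb, Bool.false_eq_true, if_false]
        cases cs.findIdx? (fun c => !pvBNumeric c) <;> simp
      simp only [pvAScan2, h, if_true, hrun]
      rw [ih]
      simp only [List.take_succ_cons, PySem.List.enumerate_cons, List.filterMap_cons,
        Prod.mk.injEq]
      refine ⟨by push_cast; ring, ?_, ?_⟩
      · by_cases hd : c = '.' <;> simp [hd]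
      · by_cases hd : c = ',' <;> simp [hd]
    · have hb : (!pvBNumeric c) = true := by
        have hb' : pvBNumeric c = false := by simpa [pvBNumeric, pvIsNum] using h
        simp [hb']
      have hrun : pvRun (c :: cs) = 0 := by
        simp [pvRun, List.findIdx?_cons, hb]
      simp [pvAScan2, h, hrun, PySem.List.enumerate_nil]

theorem pvEnum_base (run : List Char) (ch : Char) (s : Int) :
    (PySem.List.enumerate run s).filterMap
        (fun p => if p.2 = ch then some p.1 else none)
      = (PySem.List.enumerate run 0).filterMap
        (fun p => if p.2 = ch then some (s + p.1) else none) := by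
  have h := pvEnum_shift run ch s 0
  rwa [add_zero] at h

theorem IdentifyNumericPart_spec : Claim_equal_IdentifyNumericPart := by
  unfold Claim_equal_IdentifyNumericPart
  intro s _
  unfold Spec_IdentifyNumericPart IdentifyNumericPart IdentifyNumericPart_alt
  simp only []
  rw [pvAScan1_eq]
  cases hf : s.toList.findIdx? pvBNumeric with
  | none =>
    simp
  | some k =>
    have hk : k < s.toList.length := (List.findIdx?_eq_some_iff_findIdx_eq.mp hf).1
    have hlt : (0 : Int) + (k : Int) < (s.toList.length : Int) := by omega
    have hne : ¬ ((k : Int) = (s.toList.length : Int)) := by omega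
    have hzk : (0 : Int) + (k : Int) = (k : Int) := by ring
    simp only [hzk, hne, if_false]
    have hnat : ((k : Int)).toNat = k := by omega
    rw [hnat]
    have hrl : (match (s.toList.drop k).findIdx? (fun c => !pvBNumeric c) with
        | some i => (i : Int)
        | none => ((s.toList.drop k).length : Int)) = ((pvRun (s.toList.drop k) : Nat) : Int) := by
      unfold pvRun
      cases hg : (s.toList.drop k).findIdx? (fun c => !pvBNumeric c) <;> simp
    rw [hrl, pvAScan2_eq]
    simp only [Int.toNat_natCast, List.nil_append]
    rw [pvEnum_base _ '.' (k : Int), pvEnum_base _ ',' (k : Int),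
      if_pos (show ((k : Int)) < (s.toList.length : Int) by exact_mod_cast hk)]

-- ===== VERDICT (by name: the statement is the Claim_ definition above) =====
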